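-- pv_equiv track=rewrite | github.com/MinKyeom/KMK-DREAM | Programmers/lv3/숫자 타자 대회.py | left_hand
-- ===== SOURCE A (Python) =====
-- def left_hand(new_x, new_y):
--     l = 0
--     while True:
--         if new_x > 0 and new_y > 0:
--             l += 3
--             new_x -= 1
--             new_y -= 1
--         elif new_x > 0 and new_y == 0:
--             l += 2
--             new_x -= 1
--         elif new_x == 0 and new_y > 0:
--             l += 2
--             new_y -= 1
--         elif new_x == 0 and new_y == 0:
--             l += 1
--             break
--         if new_x == 0 and new_y == 0:
--             break
--     return l
-- ===== SOURCE B (Python) =====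
-- def left_hand(new_x, new_y):
--     # Closed form: 1 keystroke if both counters are already zero;
--     # otherwise 3 per paired step plus 2 per leftover step = 2*(x+y) - min(x,y).
--     if new_x == 0 and new_y == 0:
--         return 1
--     return 2 * (new_x + new_y) - min(new_x, new_y)
-- ===== Notes on version B (the rewrite author's own statement) =====
-- stated objective: faster
-- what changed: Replaces the decrement-until-zero loop by a closed-form arithmetic expression (2*(x+y) - min(x,y), with 1 for the (0,0) case).
-- outside the precondition, e.g. on left_hand(-1, 0): A does not finish within the time limit, B returns -1
import Mathlib
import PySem

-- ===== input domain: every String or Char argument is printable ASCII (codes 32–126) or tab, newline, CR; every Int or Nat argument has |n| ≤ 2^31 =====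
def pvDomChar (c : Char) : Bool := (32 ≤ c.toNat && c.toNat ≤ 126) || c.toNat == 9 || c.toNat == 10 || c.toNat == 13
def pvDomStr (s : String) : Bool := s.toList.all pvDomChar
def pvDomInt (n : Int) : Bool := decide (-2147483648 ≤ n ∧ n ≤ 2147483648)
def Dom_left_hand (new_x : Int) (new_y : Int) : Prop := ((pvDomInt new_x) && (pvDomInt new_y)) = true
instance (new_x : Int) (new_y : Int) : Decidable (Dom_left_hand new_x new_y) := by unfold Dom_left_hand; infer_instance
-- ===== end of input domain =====

-- B replaces A's decrement loop by a closed-form expression; Pre_ excludes negative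
-- inputs, on which the Python A loops forever (no branch fires and the loop never breaks).
-- ===== PORT A =====
-- literal transliteration of A's while-loop: each iteration updates (new_x, new_y, l)
-- by the same branch A takes, and the post-branch 'if new_x == 0 and new_y == 0: break'
-- is the inner condition after each update; on negative inputs (where Python diverges,
-- excluded by Pre_) the loop body changes nothing, so the port returns l there.
def leftHandLoop (new_x : Int) (new_y : Int) (l : Int) : Int :=
  if new_x > 0 ∧ new_y > 0 then
    if new_x - 1 = 0 ∧ new_y - 1 = 0 then l + 3
    else leftHandLoop (new_x - 1) (new_y - 1) (l + 3)
  else if new_x > 0 ∧ new_y = 0 then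
    if new_x - 1 = 0 then l + 2 else leftHandLoop (new_x - 1) new_y (l + 2)
  else if new_x = 0 ∧ new_y > 0 then
    if new_y - 1 = 0 then l + 2 else leftHandLoop new_x (new_y - 1) (l + 2)
  else if new_x = 0 ∧ new_y = 0 then l + 1
  else l
termination_by (new_x + new_y).toNat
decreasing_by all_goals omega

def left_hand (new_x : Int) (new_y : Int) : Int := leftHandLoop new_x new_y 0

-- ===== PORT B =====
def left_hand_alt (new_x : Int) (new_y : Int) : Int :=
  if new_x = 0 ∧ new_y = 0 then 1
  else 2 * (new_x + new_y) - min new_x new_y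

-- ===== PRECONDITION & SPEC =====
-- Pre_ excludes negative arguments: there the Python A never returns (infinite loop).
def Pre_left_hand (new_x : Int) (new_y : Int) : Prop := 0 ≤ new_x ∧ 0 ≤ new_y
instance (new_x : Int) (new_y : Int) : Decidable (Pre_left_hand new_x new_y) := by
  unfold Pre_left_hand; infer_instance
def pvWitness_left_hand : Int × Int := (3, 5)

def Spec_left_hand (new_x : Int) (new_y : Int) (out : Int) : Prop := out = left_hand_alt new_x new_y
instance (new_x : Int) (new_y : Int) (out : Int) : Decidable (Spec_left_hand new_x new_y out) := by unfold Spec_left_hand; infer_instance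

-- ===== CLAIM (what is proved, stated in full; the proofs are below) =====
def Claim_equal_left_hand : Prop := ∀ (new_x : Int) (new_y : Int), Dom_left_hand new_x new_y → Pre_left_hand new_x new_y → Spec_left_hand new_x new_y (left_hand new_x new_y)

-- ===== LEMMAS AND PROOFS =====

-- ===== VERDICT (by name: the statement is the Claim_ definition above) =====
theorem leftHandLoop_closed (n : Nat) : ∀ (x y l : Int), (x + y).toNat = n → 0 ≤ x → 0 ≤ y →
    leftHandLoop x y l = l + (if x = 0 ∧ y = 0 then 1 else 2 * (x + y) - min x y) := by
  induction n using Nat.strong_induction_on with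
  | _ n ih =>
    intro x y l hn hx hy
    rw [leftHandLoop]
    split_ifs with h1 h2 h3 h4 h5 h6 h7 <;> try omega
    · rw [ih ((x - 1 + (y - 1)).toNat) (by omega) _ _ _ rfl (by omega) (by omega)]
      split_ifs <;> omega
    · rw [ih ((x - 1 + y).toNat) (by omega) _ _ _ rfl (by omega) (by omega)]
      split_ifs <;> omega
    · rw [ih ((x + (y - 1)).toNat) (by omega) _ _ _ rfl (by omega) (by omega)]
      split_ifs <;> omega

theorem left_hand_spec : Claim_equal_left_hand := by
  intro x y _ hpre
  unfold Spec_left_hand left_hand left_hand_alt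
  rw [leftHandLoop_closed ((x + y).toNat) x y 0 rfl hpre.1 hpre.2]
  split_ifs <;> omega
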